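-- pv_equiv track=rewrite | github.com/a-aksyonov/checkio-missions-soltions | simple/node-subnetwork.py | group_vertexes
-- ===== SOURCE A (Python) =====
-- from collections import defaultdict
--
-- def create_adjacency_matrix(connections):
--     matrix = defaultdict(dict)
--     for a, b in connections:
--         matrix[a][b] = 1
--         matrix[b][a] = 1
--     return matrix
--
-- def is_connected_to_all(vertex, group, matrix):
--     for v in group:
--         if vertex != v and vertex not in matrix[v]:
--             return False
--     return True
--
-- def group_vertexes(input):
--     matrix = create_adjacency_matrix(input)
--     groups = []
--     current_group = set()
--     for vertex in matrix.keys():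
--         if is_connected_to_all(vertex, current_group, matrix):
--             current_group.add(vertex)
--         else:
--             groups.append(current_group)
--             current_group = {vertex}
--     groups.append(current_group)
--     return groups
-- ===== SOURCE B (Python) =====
-- def group_vertexes(input):
--     # Same key order as A's defaultdict (first appearance), but neighbor SETS,
--     # and the inner "connected to all of group" scan is replaced by a maintained
--     # running intersection `common` of the group members' neighbor sets.
--     adj = {}
--     for a, b in input:
--         adj.setdefault(a, set()).add(b)
--         adj.setdefault(b, set()).add(a)
--     groups = []
--     group = set()
--     common = set()
--     for v in adj:
--         if not group or v in common:
--             common = set(adj[v]) if not group else common & adj[v]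
--             group.add(v)
--         else:
--             groups.append(group)
--             group = {v}
--             common = set(adj[v])
--     groups.append(group)
--     return groups
-- ===== Notes on version B (the rewrite author's own statement) =====
-- stated objective: alternative
-- what changed: B builds a dict of neighbor SETS and, instead of re-scanning the whole current group per vertex (is_connected_to_all), maintains a running intersection `common` of the group members' neighbor sets, so the accept test is a single membership check.
import Mathlib
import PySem

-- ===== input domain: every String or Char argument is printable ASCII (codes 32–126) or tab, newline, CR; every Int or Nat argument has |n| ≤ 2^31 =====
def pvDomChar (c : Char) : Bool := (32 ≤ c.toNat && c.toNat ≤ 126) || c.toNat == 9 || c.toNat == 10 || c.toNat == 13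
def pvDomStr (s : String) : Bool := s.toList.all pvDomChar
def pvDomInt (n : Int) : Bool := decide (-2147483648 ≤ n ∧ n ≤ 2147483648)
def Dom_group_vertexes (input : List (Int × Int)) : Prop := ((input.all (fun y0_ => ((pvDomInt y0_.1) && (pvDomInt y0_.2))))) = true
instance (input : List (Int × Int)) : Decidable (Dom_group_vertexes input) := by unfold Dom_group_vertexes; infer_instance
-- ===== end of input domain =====

-- B replaces A's inner is_connected_to_all scan over the current group by a maintained
-- running intersection of the group members' neighbor sets (objective: alternative).

-- ===== PORT A =====
-- create_adjacency_matrix: defaultdict(dict); matrix[a][b] = 1; matrix[b][a] = 1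
def pvStepMatA (m : PySem.Dict Int (PySem.Dict Int Int)) (p : Int × Int) :
    PySem.Dict Int (PySem.Dict Int Int) :=
  let m1 := m.insert p.1 ((m.getD p.1 PySem.Dict.empty).insert p.2 1)
  m1.insert p.2 ((m1.getD p.2 PySem.Dict.empty).insert p.1 1)

def pvMatrixA (input : List (Int × Int)) : PySem.Dict Int (PySem.Dict Int Int) :=
  input.foldl pvStepMatA PySem.Dict.empty

-- is_connected_to_all: for v in group: if vertex != v and vertex not in matrix[v]: return False
-- (matrix[v] on the defaultdict = getD v empty, exact for lookups)
def pvConnAll (vertex : Int) (group : List Int)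
    (matrix : PySem.Dict Int (PySem.Dict Int Int)) : Bool :=
  match group with
  | [] => true
  | v :: rest =>
    if vertex ≠ v ∧ (matrix.getD v PySem.Dict.empty).contains vertex = false then false
    else pvConnAll vertex rest matrix

def pvStepA (matrix : PySem.Dict Int (PySem.Dict Int Int))
    (st : List (List Int) × PySem.Set Int) (vertex : Int) :
    List (List Int) × PySem.Set Int :=
  if pvConnAll vertex st.2 matrix then (st.1, PySem.Set.add st.2 vertex)
  else (st.1 ++ [st.2], PySem.Set.ofList [vertex])

def group_vertexes (input : List (Int × Int)) : List (List Int) :=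
  let matrix := pvMatrixA input
  let st := matrix.keys.foldl (pvStepA matrix) ([], PySem.Set.empty)
  st.1 ++ [st.2]

-- ===== PORT B =====
-- adj.setdefault(a, set()).add(b) (in-place add rendered functionally)
def pvStepAdjB (d : PySem.Dict Int (PySem.Set Int)) (p : Int × Int) :
    PySem.Dict Int (PySem.Set Int) :=
  let d1 := d.insert p.1 (PySem.Set.add (d.getD p.1 PySem.Set.empty) p.2)
  d1.insert p.2 (PySem.Set.add (d1.getD p.2 PySem.Set.empty) p.1)

def pvAdjB (input : List (Int × Int)) : PySem.Dict Int (PySem.Set Int) :=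
  input.foldl pvStepAdjB PySem.Dict.empty

-- state: (groups, group, common)
def pvStepB (adj : PySem.Dict Int (PySem.Set Int))
    (st : List (List Int) × PySem.Set Int × PySem.Set Int) (v : Int) :
    List (List Int) × PySem.Set Int × PySem.Set Int :=
  if st.2.1 = [] ∨ v ∈ st.2.2 then
    (st.1, PySem.Set.add st.2.1 v,
      if st.2.1 = [] then PySem.Set.ofList (adj.getD v PySem.Set.empty)
      else PySem.Set.inter st.2.2 (adj.getD v PySem.Set.empty))
  else
    (st.1 ++ [st.2.1], PySem.Set.ofList [v], PySem.Set.ofList (adj.getD v PySem.Set.empty))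

def group_vertexes_alt (input : List (Int × Int)) : List (List Int) :=
  let adj := pvAdjB input
  let st := adj.keys.foldl (pvStepB adj) ([], PySem.Set.empty, PySem.Set.empty)
  st.1 ++ [st.2.1]

-- ===== PRECONDITION & SPEC =====
def Spec_group_vertexes (input : List (Int × Int)) (out : List (List Int)) : Prop := out = group_vertexes_alt input
instance (input : List (Int × Int)) (out : List (List Int)) : Decidable (Spec_group_vertexes input out) := by unfold Spec_group_vertexes; infer_instance

-- ===== CLAIM (what is proved, stated in full; the proofs are below) =====
def Claim_equal_group_vertexes : Prop := ∀ (input : List (Int × Int)), Dom_group_vertexes input → Spec_group_vertexes input (group_vertexes input)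

-- ===== LEMMAS AND PROOFS =====

-- keys of the two adjacency structures coincide (both insert p.1 then p.2 per pair)
lemma pvKeys_insert_congr {ν₁ ν₂ : Type} (d₁ : PySem.Dict Int ν₁) (d₂ : PySem.Dict Int ν₂)
    (k : Int) (v₁ : ν₁) (v₂ : ν₂) (h : d₁.keys = d₂.keys) :
    (d₁.insert k v₁).keys = (d₂.insert k v₂).keys := by
  by_cases hc : k ∈ d₁.keys
  · have h1 : d₁.contains k = true := by
      simp [PySem.Dict.contains_eq_decide_mem_keys, hc]
    have h2 : d₂.contains k = true := by
      simp [PySem.Dict.contains_eq_decide_mem_keys, ← h, hc]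
    rw [PySem.Dict.keys_insert_of_contains _ v₁ h1,
        PySem.Dict.keys_insert_of_contains _ v₂ h2, h]
  · have h1 : d₁.contains k = false := by
      simp [PySem.Dict.contains_eq_decide_mem_keys, hc]
    have h2 : d₂.contains k = false := by
      simp [PySem.Dict.contains_eq_decide_mem_keys, ← h, hc]
    rw [PySem.Dict.keys_insert_of_not_contains _ v₁ h1,
        PySem.Dict.keys_insert_of_not_contains _ v₂ h2, h]

lemma pvKeys_eq (input : List (Int × Int)) :
    ∀ (m : PySem.Dict Int (PySem.Dict Int Int)) (d : PySem.Dict Int (PySem.Set Int)),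
      m.keys = d.keys → (input.foldl pvStepMatA m).keys = (input.foldl pvStepAdjB d).keys := by
  induction input with
  | nil => intro m d h; simpa using h
  | cons p t ih =>
    intro m d h
    simp only [List.foldl_cons]
    exact ih _ _ (by
      unfold pvStepMatA pvStepAdjB
      exact pvKeys_insert_congr _ _ _ _ _ (pvKeys_insert_congr _ _ _ _ _ h))

lemma pvNodupA (input : List (Int × Int)) :
    ∀ (m : PySem.Dict Int (PySem.Dict Int Int)), m.keys.Nodup →
      (input.foldl pvStepMatA m).keys.Nodup := by
  induction input with
  | nil => intro m h; simpa using h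
  | cons p t ih =>
    intro m h
    exact ih _ (PySem.Dict.nodup_keys_insert _ _ _ (PySem.Dict.nodup_keys_insert _ _ _ h))

-- membership in A's inner dicts coincides with membership in B's neighbor sets
lemma pvMem_eq (input : List (Int × Int)) :
    ∀ (m : PySem.Dict Int (PySem.Dict Int Int)) (d : PySem.Dict Int (PySem.Set Int)),
      (∀ u x, (m.getD u PySem.Dict.empty).contains x = true ↔ x ∈ d.getD u PySem.Set.empty) →
      ∀ u x, ((input.foldl pvStepMatA m).getD u PySem.Dict.empty).contains x = true ↔
             x ∈ (input.foldl pvStepAdjB d).getD u PySem.Set.empty := by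
  induction input with
  | nil => intro m d h; simpa using h
  | cons p t ih =>
    intro m d h
    simp only [List.foldl_cons]
    apply ih
    intro u x
    unfold pvStepMatA pvStepAdjB
    simp only [PySem.Dict.getD_insert]
    split_ifs with h1 h2 <;>
      simp [PySem.Dict.contains_insert, PySem.Set.mem_add, h] <;> tauto

-- pvConnAll characterisation
lemma pvConnAll_iff (m : PySem.Dict Int (PySem.Dict Int Int)) (vertex : Int) :
    ∀ group : List Int, pvConnAll vertex group m = true ↔
      ∀ v ∈ group, vertex ≠ v → (m.getD v PySem.Dict.empty).contains vertex = true := by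
  intro group
  induction group with
  | nil => simp [pvConnAll]
  | cons v rest ih =>
    unfold pvConnAll
    split_ifs with h
    · simp only [false_iff, not_forall]
      exact ⟨v, by simp, h.1, by simp [h.2]⟩
    · rw [ih]
      constructor
      · intro hr u hu hne
        rcases List.mem_cons.mp hu with rfl | hu
        · cases hb : (m.getD u PySem.Dict.empty).contains vertex
          · exact absurd ⟨hne, hb⟩ h
          · rfl
        · exact hr u hu hne
      · intro hall u hu hne; exact hall u (List.mem_cons_of_mem _ hu) hne

lemma pvSet_ofList_singleton (x : Int) : PySem.Set.ofList [x] = [x] := rfl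

-- the main loop equivalence
lemma pvLoop_eq (m : PySem.Dict Int (PySem.Dict Int Int)) (adj : PySem.Dict Int (PySem.Set Int))
    (hmem : ∀ u x, (m.getD u PySem.Dict.empty).contains x = true ↔ x ∈ adj.getD u PySem.Set.empty) :
    ∀ (ks : List Int) (groups : List (List Int)) (cur common : PySem.Set Int),
      ks.Nodup → (∀ x ∈ ks, x ∉ cur) →
      (cur ≠ [] → ∀ x, x ∈ common ↔ ∀ u ∈ cur, x ∈ adj.getD u PySem.Set.empty) →
      ks.foldl (pvStepA m) (groups, cur) =
        ((ks.foldl (pvStepB adj) (groups, cur, common)).1,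
         (ks.foldl (pvStepB adj) (groups, cur, common)).2.1) := by
  intro ks
  induction ks with
  | nil => intro groups cur common _ _ _; rfl
  | cons v t ih =>
    intro groups cur common hnd hdisj hcom
    have hvnotcur : v ∉ cur := hdisj v (by simp)
    have hvnott : v ∉ t := (List.nodup_cons.mp hnd).1
    have hndt : t.Nodup := (List.nodup_cons.mp hnd).2
    by_cases hc : ∀ u ∈ cur, v ∈ adj.getD u PySem.Set.empty
    · -- accepted into the group
      have hA : pvConnAll v cur m = true := by
        rw [pvConnAll_iff]
        intro u hu _; exact (hmem u v).mpr (hc u hu)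
      have hB : cur = [] ∨ v ∈ common := by
        by_cases hnil : cur = []
        · exact Or.inl hnil
        · exact Or.inr ((hcom hnil v).mpr hc)
      simp only [List.foldl_cons, pvStepA, pvStepB, hA, if_true, if_pos hB]
      apply ih
      · exact hndt
      · intro x hx hmemadd
        rcases (PySem.Set.mem_add cur v x).mp hmemadd with hxc | rfl
        · exact hdisj x (List.mem_cons_of_mem _ hx) hxc
        · exact hvnott hx
      · intro _ x
        by_cases hnil : cur = []
        · rw [if_pos hnil]
          subst hnil
          constructor
          · intro hx u hu
            rcases (PySem.Set.mem_add [] v u).mp hu with h' | rfl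
            · exact absurd h' (List.not_mem_nil)
            · exact (PySem.Set.mem_ofList _ _).mp hx
          · intro hall
            exact (PySem.Set.mem_ofList _ _).mpr
              (hall v ((PySem.Set.mem_add [] v v).mpr (Or.inr rfl)))
        · rw [if_neg hnil, PySem.Set.mem_inter, hcom hnil x]
          constructor
          · rintro ⟨hall, hv⟩ u hu
            rcases (PySem.Set.mem_add cur v u).mp hu with h' | rfl
            · exact hall u h'
            · exact hv
          · intro hall
            exact ⟨fun u hu => hall u ((PySem.Set.mem_add cur v u).mpr (Or.inl hu)),
                   hall v ((PySem.Set.mem_add cur v v).mpr (Or.inr rfl))⟩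
    · -- rejected: start a new group
      have hA : pvConnAll v cur m = false := by
        cases hA' : pvConnAll v cur m
        · rfl
        · exfalso; apply hc
          intro u hu
          exact (hmem u v).mp ((pvConnAll_iff m v cur).mp hA' u hu
            (fun he => hvnotcur (he ▸ hu)))
      have hB : ¬ (cur = [] ∨ v ∈ common) := by
        rintro (hnil | hvc)
        · exact hc (fun u hu => absurd (hnil ▸ hu) (List.not_mem_nil))
        · have hnil : cur ≠ [] := by
            rintro rfl
            exact hc (fun u hu => absurd hu (List.not_mem_nil))
          exact hc ((hcom hnil v).mp hvc)
      simp only [List.foldl_cons, pvStepA, pvStepB, hA, Bool.false_eq_true, if_false, if_neg hB]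
      apply ih
      · exact hndt
      · intro x hx hmem1
        rw [pvSet_ofList_singleton] at hmem1
        simp only [List.mem_singleton] at hmem1
        exact hvnott (hmem1 ▸ hx)
      · intro _ x
        rw [pvSet_ofList_singleton]
        simp [PySem.Set.mem_ofList]

-- ===== VERDICT (by name: the statement is the Claim_ definition above) =====
theorem group_vertexes_spec : Claim_equal_group_vertexes := by
  intro input _
  unfold Spec_group_vertexes
  simp only [group_vertexes, group_vertexes_alt]
  have hkeys : (pvMatrixA input).keys = (pvAdjB input).keys :=
    pvKeys_eq input PySem.Dict.empty PySem.Dict.empty (by simp [pysem])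
  have hmem : ∀ u x, ((pvMatrixA input).getD u PySem.Dict.empty).contains x = true ↔
      x ∈ (pvAdjB input).getD u PySem.Set.empty :=
    pvMem_eq input PySem.Dict.empty PySem.Dict.empty (by intro u x; simp [pysem])
  have hnd : (pvMatrixA input).keys.Nodup :=
    pvNodupA input PySem.Dict.empty (by simp [pysem])
  have h := pvLoop_eq (pvMatrixA input) (pvAdjB input) hmem (pvMatrixA input).keys
    [] PySem.Set.empty PySem.Set.empty hnd
    (by intro x _ hx; exact absurd hx (List.not_mem_nil))
    (by intro hne; exact absurd rfl hne)
  rw [← hkeys, h]
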